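-- pv_equiv track=rewrite | github.com/pypi-data/pypi-mirror-399 | packages/onfire/onfire-0.1.1.tar.gz/onfire-0.1.1/termsite/__main__.py | _rgb_to_xterm_256
-- ===== SOURCE A (Python) =====
-- _XTERM_LEVELS = (0, 95, 135, 175, 215, 255)
--
-- def _clamp(x: int, lo: int, hi: int) -> int:
--     return lo if x < lo else hi if x > hi else x
--
-- def _rgb_to_xterm_256(r: int, g: int, b: int) -> int:
--     """Approximate RGB -> xterm-256 index (0..255)."""
--     r = _clamp(r, 0, 255)
--     g = _clamp(g, 0, 255)
--     b = _clamp(b, 0, 255)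
--
--     # Grayscale ramp (232..255) is often smoother for near-equal RGB.
--     if abs(r - g) < 8 and abs(g - b) < 8:
--         v = (r + g + b) // 3
--         if v < 8:
--             return 16
--         if v > 238:
--             return 231
--         return 232 + ((v - 8) // 10)
--
--     def nearest_level(v: int) -> int:
--         best_i = 0
--         best_d = 10**9
--         for i, lv in enumerate(_XTERM_LEVELS):
--             d = abs(lv - v)
--             if d < best_d:
--                 best_d = d
--                 best_i = i
--         return best_i
--
--     ri = nearest_level(r)
--     gi = nearest_level(g)
--     bi = nearest_level(b)
--     return 16 + 36 * ri + 6 * gi + bi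
-- ===== SOURCE B (Python) =====
-- def _rgb_to_xterm_256(r: int, g: int, b: int) -> int:
--     """Approximate RGB -> xterm-256 index (0..255)."""
--     r = min(255, max(0, r))
--     g = min(255, max(0, g))
--     b = min(255, max(0, b))
--
--     if abs(r - g) < 8 and abs(g - b) < 8:
--         v = (r + g + b) // 3
--         if v < 8:
--             return 16
--         if v > 238:
--             return 231
--         return 232 + ((v - 8) // 10)
--
--     # Closed-form level index: count midpoint cut points at or below v
--     # (cuts chosen so an exactly equidistant value takes the LOWER level).
--     def level(v: int) -> int:
--         return sum(1 for c in (48, 116, 156, 196, 236) if v >= c)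
--
--     return 16 + 36 * level(r) + 6 * level(g) + level(b)
-- ===== Notes on version B (the rewrite author's own statement) =====
-- stated objective: simpler
-- what changed: Replaced the per-channel linear nearest-level scan (best-index/best-distance loop over the six xterm levels) with a closed-form level index: count the five midpoint cut points (48,116,156,196,236) at or below the value; clamps and the grayscale branch are unchanged.
import Mathlib
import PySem

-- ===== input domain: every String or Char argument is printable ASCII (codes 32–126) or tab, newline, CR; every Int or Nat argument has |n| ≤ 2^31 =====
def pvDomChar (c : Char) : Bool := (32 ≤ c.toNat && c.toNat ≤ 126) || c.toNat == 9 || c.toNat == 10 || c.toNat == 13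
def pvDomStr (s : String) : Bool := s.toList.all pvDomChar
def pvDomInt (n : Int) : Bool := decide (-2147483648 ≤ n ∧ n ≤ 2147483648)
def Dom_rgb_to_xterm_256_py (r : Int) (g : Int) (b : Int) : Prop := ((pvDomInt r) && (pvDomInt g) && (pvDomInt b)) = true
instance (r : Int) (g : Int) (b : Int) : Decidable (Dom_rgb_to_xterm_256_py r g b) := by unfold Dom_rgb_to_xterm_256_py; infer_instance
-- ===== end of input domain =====

-- B replaces A's per-channel linear scan over the six xterm levels with a closed-form count of midpoint cut points (simpler; same clamps and grayscale branch).


-- ===== PORT A =====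
def pvClampA (x lo hi : Int) : Int :=
  if x < lo then lo else if x > hi then hi else x

-- transliteration of nearest_level: linear scan over enumerate(_XTERM_LEVELS)
def pvNearestLevel (v : Int) : Int :=
  (((PySem.List.enumerate ([0, 95, 135, 175, 215, 255] : List Int)).foldl
      (fun (st : Int × Int) (p : Int × Int) =>
        let d : Int := (p.2 - v).natAbs
        if d < st.2 then (p.1, d) else st)
      (0, 1000000000))).1

def rgb_to_xterm_256_py (r : Int) (g : Int) (b : Int) : Int :=
  let r := pvClampA r 0 255
  let g := pvClampA g 0 255
  let b := pvClampA b 0 255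
  if (r - g).natAbs < 8 ∧ (g - b).natAbs < 8 then
    let v := PySem.Int.floordiv (r + g + b) 3
    if v < 8 then 16
    else if v > 238 then 231
    else 232 + PySem.Int.floordiv (v - 8) 10
  else
    16 + 36 * pvNearestLevel r + 6 * pvNearestLevel g + pvNearestLevel b

-- ===== PORT B =====
-- closed-form level index: count of midpoint cut points at or below v
def pvLevelB (v : Int) : Int :=
  (([48, 116, 156, 196, 236] : List Int).countP (fun c => v ≥ c) : Int)

def rgb_to_xterm_256_py_alt (r : Int) (g : Int) (b : Int) : Int :=
  let r := min 255 (max 0 r)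
  let g := min 255 (max 0 g)
  let b := min 255 (max 0 b)
  if (r - g).natAbs < 8 ∧ (g - b).natAbs < 8 then
    let v := PySem.Int.floordiv (r + g + b) 3
    if v < 8 then 16
    else if v > 238 then 231
    else 232 + PySem.Int.floordiv (v - 8) 10
  else
    16 + 36 * pvLevelB r + 6 * pvLevelB g + pvLevelB b

-- ===== PRECONDITION & SPEC =====
def Spec_rgb_to_xterm_256_py (r : Int) (g : Int) (b : Int) (out : Int) : Prop := out = rgb_to_xterm_256_py_alt r g b
instance (r : Int) (g : Int) (b : Int) (out : Int) : Decidable (Spec_rgb_to_xterm_256_py r g b out) := by unfold Spec_rgb_to_xterm_256_py; infer_instance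

-- ===== CLAIM (what is proved, stated in full; the proofs are below) =====
def Claim_equal_rgb_to_xterm_256_py : Prop := ∀ (r : Int) (g : Int) (b : Int), Dom_rgb_to_xterm_256_py r g b → Spec_rgb_to_xterm_256_py r g b (rgb_to_xterm_256_py r g b)

-- ===== LEMMAS AND PROOFS =====
lemma clamp_eq (x : Int) : pvClampA x 0 255 = min 255 (max 0 x) := by
  unfold pvClampA; split_ifs <;> omega

set_option maxRecDepth 100000 in
lemma nearest_eq_range :
    (List.range 256).all (fun n => pvNearestLevel (n : Int) == pvLevelB (n : Int)) = true := by
  decide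

lemma nearest_eq (v : Int) (h0 : 0 ≤ v) (h1 : v ≤ 255) : pvNearestLevel v = pvLevelB v := by
  have h := List.all_eq_true.mp nearest_eq_range v.toNat
    (List.mem_range.mpr (by omega))
  have hv : ((v.toNat : Nat) : Int) = v := by omega
  rw [hv] at h
  exact beq_iff_eq.mp h

lemma clamp_bounds (x : Int) : 0 ≤ min 255 (max 0 x) ∧ min 255 (max 0 x) ≤ 255 := by omega


-- ===== VERDICT (by name: the statement is the Claim_ definition above) =====
theorem rgb_to_xterm_256_py_spec : Claim_equal_rgb_to_xterm_256_py := by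
  intro r g b _
  unfold Spec_rgb_to_xterm_256_py rgb_to_xterm_256_py rgb_to_xterm_256_py_alt
  simp only [clamp_eq]
  have cr := clamp_bounds r
  have cg := clamp_bounds g
  have cb := clamp_bounds b
  by_cases h : (min 255 (max 0 r) - min 255 (max 0 g)).natAbs < 8 ∧
      (min 255 (max 0 g) - min 255 (max 0 b)).natAbs < 8
  · simp only [if_pos h]
  · simp only [if_neg h,
      nearest_eq _ cr.1 cr.2, nearest_eq _ cg.1 cg.2, nearest_eq _ cb.1 cb.2]
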